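-- pv_equiv track=rewrite | github.com/Lancelot888888/microRNA_NLP | NER.py | group_by_sentence
-- ===== SOURCE A (Python) =====
-- def group_by_sentence(predictions, labels, attention_masks):
--     grouped_predictions = []
--     grouped_labels = []
--     for i in range(len(attention_masks)):
--         sentence_predictions = []
--         sentence_labels = []
--         for j in range(len(attention_masks[i])):
--             if attention_masks[i][j] == 0:
--                 break
--             sentence_predictions.append(predictions[i][j])
--             sentence_labels.append(labels[i][j])
--         grouped_predictions.append(sentence_predictions)
--         grouped_labels.append(sentence_labels)
--     return grouped_predictions, grouped_labels
-- ===== SOURCE B (Python) =====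
-- def group_by_sentence(predictions, labels, attention_masks):
--     # Latched-flag approach: no break/early exit. First pass computes, per row,
--     # a boolean validity vector (prefix-AND of "mask entry nonzero": True up to
--     # the first zero, False from there on); second stage gathers the elements
--     # whose flag is True.
--     flag_rows = []
--     for mask in attention_masks:
--         alive = True
--         flags = []
--         for m in mask:
--             alive = alive and m != 0
--             flags.append(alive)
--         flag_rows.append(flags)
--     grouped_predictions = [[predictions[i][j] for j, f in enumerate(flags) if f]
--                            for i, flags in enumerate(flag_rows)]
--     grouped_labels = [[labels[i][j] for j, f in enumerate(flags) if f]
--                       for i, flags in enumerate(flag_rows)]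
--     return grouped_predictions, grouped_labels
-- ===== Notes on version B (the rewrite author's own statement) =====
-- stated objective: alternative
-- what changed: Replaces A's interleaved append-with-break loop by a latched-flag design with no early exit: a first pass computes per row a boolean prefix-AND validity vector over the whole mask, a second stage gathers the elements whose flag is True.
import Mathlib
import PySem

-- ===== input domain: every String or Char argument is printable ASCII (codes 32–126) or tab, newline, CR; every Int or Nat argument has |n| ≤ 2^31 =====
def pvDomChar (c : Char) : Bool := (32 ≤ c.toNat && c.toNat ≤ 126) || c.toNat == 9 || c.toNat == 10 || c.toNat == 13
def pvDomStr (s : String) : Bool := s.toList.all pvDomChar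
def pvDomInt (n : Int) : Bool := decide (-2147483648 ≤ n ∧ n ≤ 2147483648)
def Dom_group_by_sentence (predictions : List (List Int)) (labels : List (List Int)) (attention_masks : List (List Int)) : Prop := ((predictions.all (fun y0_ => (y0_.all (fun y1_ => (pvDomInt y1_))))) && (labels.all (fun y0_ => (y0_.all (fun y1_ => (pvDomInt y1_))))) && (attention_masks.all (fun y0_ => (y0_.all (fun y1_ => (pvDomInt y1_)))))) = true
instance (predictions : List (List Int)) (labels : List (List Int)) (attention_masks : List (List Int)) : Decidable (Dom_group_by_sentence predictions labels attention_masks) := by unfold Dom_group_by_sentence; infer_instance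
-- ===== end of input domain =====

-- B replaces A's interleaved append-with-break loop by a latched-flag design with no
-- early exit: it first computes, per row, a boolean prefix-AND validity vector over the
-- whole mask, then gathers the flagged elements — alternative decomposition, same cost.

-- ===== PORT A =====
-- inner 'for j in range(len(mask)): if mask[j]==0: break; sp.append(pred[j]); sl.append(lab[j])'
def gbsInner (pred lab mask : List Int) (j : Nat) (sp sl : List Int) : List Int × List Int :=
  if h : j < mask.length then
    if mask[j] = 0 then (sp, sl)
    else gbsInner pred lab mask (j + 1)
          (sp ++ [PySem.List.pyGetD pred (j : Int) 0])
          (sl ++ [PySem.List.pyGetD lab (j : Int) 0])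
  else (sp, sl)
termination_by mask.length - j

def group_by_sentence (predictions : List (List Int)) (labels : List (List Int)) (attention_masks : List (List Int)) : List (List Int) × List (List Int) :=
  (PySem.List.pyRange 0 (attention_masks.length : Int) 1).foldl
    (fun acc i =>
      let r := gbsInner (PySem.List.pyGetD predictions i []) (PySem.List.pyGetD labels i [])
                        (PySem.List.pyGetD attention_masks i []) 0 [] []
      (acc.1 ++ [r.1], acc.2 ++ [r.2]))
    ([], [])

-- ===== PORT B =====
-- 'alive = True; for m in mask: alive = alive and m != 0; flags.append(alive)'
def rowFlags (alive : Bool) : List Int → List Bool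
  | [] => []
  | m :: rest =>
      let a := alive && !(m == 0)
      a :: rowFlags a rest

def group_by_sentence_alt (predictions : List (List Int)) (labels : List (List Int)) (attention_masks : List (List Int)) : List (List Int) × List (List Int) :=
  let flag_rows := attention_masks.map (fun mask => rowFlags true mask)
  let grouped_predictions := (PySem.List.enumerate flag_rows).map (fun iflags =>
      (PySem.List.enumerate iflags.2).filterMap (fun jf =>
        if jf.2 then some (PySem.List.pyGetD (PySem.List.pyGetD predictions iflags.1 []) jf.1 0) else none))
  let grouped_labels := (PySem.List.enumerate flag_rows).map (fun iflags =>
      (PySem.List.enumerate iflags.2).filterMap (fun jf =>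
        if jf.2 then some (PySem.List.pyGetD (PySem.List.pyGetD labels iflags.1 []) jf.1 0) else none))
  (grouped_predictions, grouped_labels)

-- ===== PRECONDITION & SPEC =====
-- Pre_ excludes exactly the inputs on which A (and likewise B) raises IndexError: rows
-- where predictions[i] or labels[i] is missing or shorter than the mask prefix before the first zero.
def Pre_group_by_sentence (predictions : List (List Int)) (labels : List (List Int)) (attention_masks : List (List Int)) : Prop :=
  ∀ i, i < attention_masks.length →
    ((attention_masks.getD i []).takeWhile (fun x => x ≠ 0)).length ≤ (predictions.getD i []).length ∧
    ((attention_masks.getD i []).takeWhile (fun x => x ≠ 0)).length ≤ (labels.getD i []).length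
instance (predictions : List (List Int)) (labels : List (List Int)) (attention_masks : List (List Int)) : Decidable (Pre_group_by_sentence predictions labels attention_masks) := by unfold Pre_group_by_sentence; infer_instance

def pvWitness_group_by_sentence : List (List Int) × List (List Int) × List (List Int) :=
  ([[1, 2], [3]], [[4, 5], [6]], [[1, 1], [1, 0]])

def Spec_group_by_sentence (predictions : List (List Int)) (labels : List (List Int)) (attention_masks : List (List Int)) (out : List (List Int) × List (List Int)) : Prop := out = group_by_sentence_alt predictions labels attention_masks
instance (predictions : List (List Int)) (labels : List (List Int)) (attention_masks : List (List Int)) (out : List (List Int) × List (List Int)) : Decidable (Spec_group_by_sentence predictions labels attention_masks out) := by unfold Spec_group_by_sentence; infer_instance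

-- ===== CLAIM (what is proved, stated in full; the proofs are below) =====
def Claim_equal_group_by_sentence : Prop := ∀ (predictions : List (List Int)) (labels : List (List Int)) (attention_masks : List (List Int)), Dom_group_by_sentence predictions labels attention_masks → Pre_group_by_sentence predictions labels attention_masks → Spec_group_by_sentence predictions labels attention_masks (group_by_sentence predictions labels attention_masks)

-- ===== LEMMAS AND PROOFS =====

-- the number of leading nonzero mask entries (where A breaks / B's flags turn false)
def firstZero : List Int → Nat
  | [] => 0
  | m :: rest => if m = 0 then 0 else firstZero rest + 1

lemma gbsInner_spec (pred lab mask : List Int) : ∀ (j : Nat) (sp sl : List Int),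
    gbsInner pred lab mask j sp sl =
      (sp ++ (List.range' j (firstZero (mask.drop j))).map (fun (t : Nat) => PySem.List.pyGetD pred (t : Int) 0),
       sl ++ (List.range' j (firstZero (mask.drop j))).map (fun (t : Nat) => PySem.List.pyGetD lab (t : Int) 0)) := by
  intro j sp sl
  fun_induction gbsInner pred lab mask j sp sl with
  | case1 j sp sl h hz =>
    rw [List.drop_eq_getElem_cons h]
    simp [firstZero, hz]
  | case2 j sp sl h hz ih =>
    rw [List.drop_eq_getElem_cons h]
    simp only [firstZero, hz, if_false, List.range'_succ, List.map_cons]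
    rw [ih]
    simp
  | case3 j sp sl h =>
    rw [List.drop_of_length_le (by omega)]
    simp [firstZero]

lemma foldl_pair_append {α β : Type} (f g : α → β) (xs : List α) :
    ∀ (a b : List β),
    xs.foldl (fun acc x => (acc.1 ++ [f x], acc.2 ++ [g x])) (a, b) = (a ++ xs.map f, b ++ xs.map g) := by
  induction xs with
  | nil => simp
  | cons x xs ih => intro a b; simp [ih]

lemma rowFlags_false (mask : List Int) :
    rowFlags false mask = List.replicate mask.length false := by
  induction mask with
  | nil => simp [rowFlags]
  | cons m rest ih => simp [rowFlags, ih, List.replicate_succ]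

lemma gather_false (pred : List Int) (n : Nat) : ∀ (s : Int),
    (PySem.List.enumerate (List.replicate n false) s).filterMap
      (fun jf => if jf.2 then some (PySem.List.pyGetD pred jf.1 0) else none) = [] := by
  induction n with
  | zero => simp [PySem.List.enumerate_nil]
  | succ k ih =>
    intro s
    rw [List.replicate_succ, PySem.List.enumerate_cons]
    simp [ih]

lemma flags_gather (pred : List Int) : ∀ (mask : List Int) (s : Int),
    (PySem.List.enumerate (rowFlags true mask) s).filterMap
      (fun jf => if jf.2 then some (PySem.List.pyGetD pred jf.1 0) else none)
      = (List.range (firstZero mask)).map (fun (t : Nat) => PySem.List.pyGetD pred (s + t) 0) := by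
  intro mask
  induction mask with
  | nil => intro s; simp [rowFlags, firstZero, PySem.List.enumerate_nil]
  | cons m rest ih =>
    intro s
    by_cases hz : m = 0
    · simp only [rowFlags, hz, firstZero]
      rw [PySem.List.enumerate_cons]
      simp [rowFlags_false, gather_false]
    · simp only [rowFlags, firstZero, hz, if_false]
      rw [PySem.List.enumerate_cons]
      rw [show (true && !((m : Int) == 0)) = true from by simp [hz]]
      rw [List.filterMap_cons_some (b := PySem.List.pyGetD pred s 0) (by simp)]
      rw [ih, List.range_succ_eq_map]
      simp only [List.map_cons, List.map_map, Nat.cast_zero, add_zero]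
      congr 1
      apply List.map_congr_left
      intro t _
      simp only [Function.comp]
      congr 1
      push_cast
      ring

lemma ports_agree (predictions labels attention_masks : List (List Int)) :
    group_by_sentence predictions labels attention_masks = group_by_sentence_alt predictions labels attention_masks := by
  simp only [group_by_sentence, group_by_sentence_alt,
    PySem.List.enumerate_eq_map_pyRange (attention_masks.map (fun mask => rowFlags true mask)) []]
  rw [foldl_pair_append
    (fun i => (gbsInner (PySem.List.pyGetD predictions i []) (PySem.List.pyGetD labels i [])
        (PySem.List.pyGetD attention_masks i []) 0 [] []).1)
    (fun i => (gbsInner (PySem.List.pyGetD predictions i []) (PySem.List.pyGetD labels i [])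
        (PySem.List.pyGetD attention_masks i []) 0 [] []).2)]
  simp only [PySem.List.len, List.length_map, List.map_map]
  rw [Prod.mk.injEq]
  constructor <;>
  · apply List.map_congr_left
    intro i _
    simp only [Function.comp]
    rw [gbsInner_spec]
    rw [show ([] : List Bool) = rowFlags true [] from rfl,
        PySem.List.pyGetD_map (fun mask => rowFlags true mask) attention_masks i]
    rw [flags_gather]
    simp [List.range_eq_range']

-- ===== VERDICT (by name: the statement is the Claim_ definition above) =====
theorem group_by_sentence_spec : Claim_equal_group_by_sentence := by
  intro p l m _ _
  unfold Spec_group_by_sentence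
  exact ports_agree p l m
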